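-- pv_equiv track=rewrite | github.com/MokshithRao/CSPP | RECAP_CSPP/Week-test5/Diagonal_Scalar_Neither_Matrices (handout)/solution.py | Scalar_Matrix
-- ===== SOURCE A (Python) =====
-- def Diagonal_Matrix(matrix):
--     for i in range(len(matrix)):
--         for j in range(len(matrix[i])):
--             if i!=j:
--                 if matrix[i][j]!=0:
--                     return False
--     return True
--
-- def Scalar_Matrix(matrix):
--     m = matrix[0][0]
--     if not Diagonal_Matrix(matrix):
--         return False
--     for i in range(len(matrix)):
--         for j in range(len(matrix[i])):
--             if i==j:
--                 if matrix[i][j]!= m: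
--                     return False
--     return True
-- ===== SOURCE B (Python) =====
-- def Scalar_Matrix(matrix):
--     m = matrix[0][0]
--     for i, row in enumerate(matrix):
--         for j, x in enumerate(row):
--             if x != (m if i == j else 0):
--                 return False
--     return True
-- ===== Notes on version B (the rewrite author's own statement) =====
-- stated objective: simpler
-- what changed: B fuses A's two separate nested traversals (off-diagonal zero check via the Diagonal_Matrix helper, then a second full pass for the diagonal) into one single enumerate-based pass checking each cell against m or 0, eliminating the helper.
import Mathlib
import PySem

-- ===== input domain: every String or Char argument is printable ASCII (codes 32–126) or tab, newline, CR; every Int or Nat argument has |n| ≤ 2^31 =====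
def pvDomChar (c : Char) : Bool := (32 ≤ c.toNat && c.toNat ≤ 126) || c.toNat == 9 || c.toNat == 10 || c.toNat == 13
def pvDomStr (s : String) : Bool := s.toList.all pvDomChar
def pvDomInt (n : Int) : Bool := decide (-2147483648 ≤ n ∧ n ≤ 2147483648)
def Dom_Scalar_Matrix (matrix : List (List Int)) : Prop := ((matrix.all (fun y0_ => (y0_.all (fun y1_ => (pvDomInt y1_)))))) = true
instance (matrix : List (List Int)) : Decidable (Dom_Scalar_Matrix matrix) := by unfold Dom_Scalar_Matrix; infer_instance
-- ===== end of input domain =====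

-- B fuses A's two nested traversals (off-diagonal check helper, then diagonal check) into one
-- enumerate-based pass; objective: simpler. Pre_ excludes matrices where A raises IndexError
-- on matrix[0][0] (empty matrix or empty first row).


-- ===== PORT A =====
-- inner loop of Diagonal_Matrix: 'for j in range(len(row)): if i!=j: if row[j]!=0: return False'
def pvARow (i : Int) : List (Int × Int) → Bool
  | [] => true
  | (j, x) :: rest => if i ≠ j then (if x ≠ 0 then false else pvARow i rest) else pvARow i rest

-- outer loop of Diagonal_Matrix
def pvARows : List (Int × List Int) → Bool
  | [] => true
  | (i, row) :: rest =>
      match pvARow i (PySem.List.enumerate row 0) with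
      | false => false
      | true => pvARows rest

def Diagonal_Matrix (matrix : List (List Int)) : Bool := pvARows (PySem.List.enumerate matrix 0)

-- inner loop of Scalar_Matrix's second pass: 'if i==j: if row[j]!=m: return False'
def pvSRow (m : Int) (i : Int) : List (Int × Int) → Bool
  | [] => true
  | (j, x) :: rest => if i = j then (if x ≠ m then false else pvSRow m i rest) else pvSRow m i rest

def pvSRows (m : Int) : List (Int × List Int) → Bool
  | [] => true
  | (i, row) :: rest =>
      match pvSRow m i (PySem.List.enumerate row 0) with
      | false => false
      | true => pvSRows m rest

-- m = matrix[0][0] raises IndexError on empty matrix / empty first row; those inputs are outside Pre_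
def Scalar_Matrix (matrix : List (List Int)) : Bool :=
  let m : Int := (matrix.headD []).headD 0
  if ¬ Diagonal_Matrix matrix then false
  else pvSRows m (PySem.List.enumerate matrix 0)

-- ===== PORT B =====
def pvBRow (m : Int) (i : Int) : List (Int × Int) → Bool
  | [] => true
  | (j, x) :: rest => if x ≠ (if i = j then m else 0) then false else pvBRow m i rest

def pvBRows (m : Int) : List (Int × List Int) → Bool
  | [] => true
  | (i, row) :: rest =>
      match pvBRow m i (PySem.List.enumerate row 0) with
      | false => false
      | true => pvBRows m rest

def Scalar_Matrix_alt (matrix : List (List Int)) : Bool :=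
  let m : Int := (matrix.headD []).headD 0
  pvBRows m (PySem.List.enumerate matrix 0)

-- ===== PRECONDITION & SPEC =====
-- Pre_ excludes exactly the inputs (empty matrix, or empty first row) where A raises IndexError at matrix[0][0]
def Pre_Scalar_Matrix (matrix : List (List Int)) : Prop :=
  matrix ≠ [] ∧ matrix.headD [] ≠ []
instance (matrix : List (List Int)) : Decidable (Pre_Scalar_Matrix matrix) := by unfold Pre_Scalar_Matrix; infer_instance

def pvWitness_Scalar_Matrix : List (List Int) := [[2, 0], [0, 2]]

def Spec_Scalar_Matrix (matrix : List (List Int)) (out : Bool) : Prop := out = Scalar_Matrix_alt matrix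
instance (matrix : List (List Int)) (out : Bool) : Decidable (Spec_Scalar_Matrix matrix out) := by unfold Spec_Scalar_Matrix; infer_instance

-- ===== CLAIM (what is proved, stated in full; the proofs are below) =====
def Claim_equal_Scalar_Matrix : Prop := ∀ (matrix : List (List Int)), Dom_Scalar_Matrix matrix → Pre_Scalar_Matrix matrix → Spec_Scalar_Matrix matrix (Scalar_Matrix matrix)

-- ===== LEMMAS AND PROOFS =====
theorem pvRow_fuse (m : Int) (i : Int) (l : List (Int × Int)) :
    pvBRow m i l = (pvARow i l && pvSRow m i l) := by
  induction l with
  | nil => rfl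
  | cons hd tl ih =>
    obtain ⟨j, x⟩ := hd
    simp only [pvBRow, pvARow, pvSRow]
    by_cases hij : i = j <;> by_cases hx0 : x = 0 <;> by_cases hxm : x = m <;>
      subst_vars <;>
      simp [*, Bool.and_left_comm, Bool.and_comm, Bool.and_assoc]

theorem pvRows_fuse (m : Int) (l : List (Int × List Int)) :
    pvBRows m l = (pvARows l && pvSRows m l) := by
  induction l with
  | nil => rfl
  | cons hd tl ih =>
    obtain ⟨i, row⟩ := hd
    simp only [pvBRows, pvARows, pvSRows, pvRow_fuse]
    cases pvARow i (PySem.List.enumerate row 0) <;> cases pvSRow m i (PySem.List.enumerate row 0) <;>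
      simp [ih]

-- ===== VERDICT (by name: the statement is the Claim_ definition above) =====
theorem Scalar_Matrix_spec : Claim_equal_Scalar_Matrix := by
  intro matrix _ _
  unfold Spec_Scalar_Matrix Scalar_Matrix Scalar_Matrix_alt Diagonal_Matrix
  simp only [pvRows_fuse]
  cases pvARows (PySem.List.enumerate matrix 0) <;> simp
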